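-- pv_equiv track=rewrite | github.com/paiml/depyler | examples/hard_error_patterns.py | simulate_timeout
-- ===== SOURCE A (Python) =====
-- def simulate_timeout(work: int, timeout: int) -> int:
--     """Simulate work with timeout. Returns completed units or -1."""
--     done: int = 0
--     elapsed: int = 0
--     while done < work:
--         if elapsed >= timeout:
--             return -1
--         done = done + 1
--         elapsed = elapsed + 1
--     return done
-- ===== SOURCE B (Python) =====
-- def simulate_timeout(work: int, timeout: int) -> int:
--     """Simulate work with timeout. Returns completed units or -1."""
--     if work <= 0:
--         return 0
--     return work if work <= timeout else -1
-- ===== Notes on version B (the rewrite author's own statement) =====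
-- stated objective: faster
-- what changed: Replaced the unit-by-unit simulation loop with a closed-form comparison: 0 for non-positive work, work if it fits within timeout, else -1.
import Mathlib
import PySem

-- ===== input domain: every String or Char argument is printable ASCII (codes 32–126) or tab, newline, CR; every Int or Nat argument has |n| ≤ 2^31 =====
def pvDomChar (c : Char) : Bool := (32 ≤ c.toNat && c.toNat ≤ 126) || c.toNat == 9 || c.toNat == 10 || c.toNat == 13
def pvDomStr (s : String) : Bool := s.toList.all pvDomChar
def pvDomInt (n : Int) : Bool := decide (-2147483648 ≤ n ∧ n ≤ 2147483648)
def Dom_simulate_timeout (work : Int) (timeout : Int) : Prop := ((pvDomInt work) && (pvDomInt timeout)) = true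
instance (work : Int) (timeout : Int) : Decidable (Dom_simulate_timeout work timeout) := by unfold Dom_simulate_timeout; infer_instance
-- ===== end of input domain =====

-- B replaces A's unit-by-unit loop with an O(1) closed-form comparison (same return value everywhere).

-- ===== PORT A =====
-- literal transliteration of A's while loop over state (done, elapsed)
def simulate_timeout_loop (work : Int) (timeout : Int) (done : Int) (elapsed : Int) : Int :=
  if done < work then
    if elapsed ≥ timeout then -1
    else simulate_timeout_loop work timeout (done + 1) (elapsed + 1)
  else done
termination_by (work - done).toNat
decreasing_by
  have : done < work := by assumption
  omega

def simulate_timeout (work : Int) (timeout : Int) : Int :=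
  simulate_timeout_loop work timeout 0 0

-- ===== PORT B =====
def simulate_timeout_alt (work : Int) (timeout : Int) : Int :=
  if work ≤ 0 then 0
  else if work ≤ timeout then work
  else -1

-- ===== PRECONDITION & SPEC =====
def Spec_simulate_timeout (work : Int) (timeout : Int) (out : Int) : Prop := out = simulate_timeout_alt work timeout
instance (work : Int) (timeout : Int) (out : Int) : Decidable (Spec_simulate_timeout work timeout out) := by unfold Spec_simulate_timeout; infer_instance

-- ===== CLAIM (what is proved, stated in full; the proofs are below) =====
def Claim_equal_simulate_timeout : Prop := ∀ (work : Int) (timeout : Int), Dom_simulate_timeout work timeout → Spec_simulate_timeout work timeout (simulate_timeout work timeout)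

-- ===== LEMMAS AND PROOFS =====

-- Loop invariant: started from done = elapsed = d, the loop computes a closed form.
theorem simulate_timeout_loop_closed (work timeout d : Int) :
    simulate_timeout_loop work timeout d d =
      if work ≤ d then d else if work ≤ timeout then work else -1 := by
  by_cases hlt : d < work
  · -- strong induction on (work - d).toNat
    have h : ∀ n : Nat, ∀ d : Int, (work - d).toNat = n → d < work →
        simulate_timeout_loop work timeout d d =
          if work ≤ timeout then work else -1 := by
      intro n
      induction n with
      | zero => intro d hn hd; omega
      | succ k ih =>
        intro d hn hd
        rw [simulate_timeout_loop]
        simp only [hd, if_pos]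
        by_cases ht : d ≥ timeout
        · have hwt : ¬ work ≤ timeout := by omega
          simp [ht, hwt]
        · simp only [ht, if_neg, not_false_iff]
          by_cases hlast : d + 1 < work
          · exact ih (d + 1) (by omega) hlast
          · have hde : d + 1 = work := by omega
            rw [simulate_timeout_loop]
            have hwt : work ≤ timeout := by omega
            simp [hde, hwt]
    rw [h (work - d).toNat d rfl hlt]
    have : ¬ work ≤ d := by omega
    simp [this]
  · rw [simulate_timeout_loop]
    have : work ≤ d := by omega
    simp [hlt, this]

-- ===== VERDICT (by name: the statement is the Claim_ definition above) =====
theorem simulate_timeout_spec : Claim_equal_simulate_timeout := by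
  intro work timeout _
  unfold Spec_simulate_timeout simulate_timeout simulate_timeout_alt
  rw [simulate_timeout_loop_closed]
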